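-- pv_equiv track=rewrite | github.com/kiranjithkrish/DS_Algo_Python | ValidStartingCity.py | validStartingCityTwo
-- ===== SOURCE A (Python) =====
-- def validStartingCityTwo(distances, fuel, mpg):
--     noOfCities = len(distances)
--     milesRemaining = 0
--     minIndex = 0
--     minMilesRemaining = 0
--     for currentCityIdx in range(noOfCities):
--         currentCityIdx = currentCityIdx%noOfCities
--         if milesRemaining<minMilesRemaining:
--             minMilesRemaining = milesRemaining
--             minIndex = currentCityIdx
--         distanceToGo  = distances[currentCityIdx]
--         fuelAtCity = fuel[currentCityIdx]
--         milesRemaining  += fuelAtCity*mpg-distanceToGo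
--     if milesRemaining>=0:
--         return minIndex
--     return -1
-- ===== SOURCE B (Python) =====
-- def validStartingCityTwo(distances, fuel, mpg):
--     total = 0
--     tank = 0
--     start = 0
--     for i, distance in enumerate(distances):
--         delta = fuel[i] * mpg - distance
--         total += delta
--         tank += delta
--         if tank < 0:
--             start = i + 1
--             tank = 0
--     return start if total >= 0 else -1
-- ===== Notes on version B (the rewrite author's own statement) =====
-- stated objective: idiomatic
-- what changed: Replaced A's running-minimum-prefix tracking (minIndex/minMilesRemaining with a redundant modulo on the index) by the standard greedy gas-station scan: a resettable tank that moves the start to i+1 whenever it goes negative, returning start if the total is nonnegative.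
import Mathlib
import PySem

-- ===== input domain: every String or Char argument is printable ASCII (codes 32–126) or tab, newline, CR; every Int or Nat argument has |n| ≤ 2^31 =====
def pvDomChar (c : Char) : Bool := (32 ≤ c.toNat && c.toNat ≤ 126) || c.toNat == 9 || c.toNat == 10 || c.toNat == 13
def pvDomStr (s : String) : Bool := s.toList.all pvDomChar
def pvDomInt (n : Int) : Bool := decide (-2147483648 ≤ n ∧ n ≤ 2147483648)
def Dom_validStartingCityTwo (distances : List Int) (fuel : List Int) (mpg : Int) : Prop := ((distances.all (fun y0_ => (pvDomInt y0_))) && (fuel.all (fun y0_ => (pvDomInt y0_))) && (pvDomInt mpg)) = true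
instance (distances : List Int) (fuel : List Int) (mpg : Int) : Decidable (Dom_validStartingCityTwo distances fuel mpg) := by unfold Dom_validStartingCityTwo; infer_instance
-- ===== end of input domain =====

-- B replaces A's running-minimum-prefix tracking by the greedy gas-station scan
-- (resettable tank, start := i+1 whenever the tank goes negative); same return value.

-- ===== PORT A =====
-- state = (milesRemaining, minIndex, minMilesRemaining)
def validStartingCityTwo (distances : List Int) (fuel : List Int) (mpg : Int) : Int :=
  let noOfCities : Int := distances.length
  let s := (PySem.List.pyRange 0 noOfCities 1).foldl
    (fun (st : Int × Int × Int) i =>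
      let currentCityIdx := PySem.Int.mod i noOfCities
      let st2 := if st.1 < st.2.2 then (st.1, currentCityIdx, st.1) else st
      let distanceToGo := PySem.List.pyGetD distances currentCityIdx 0
      let fuelAtCity := PySem.List.pyGetD fuel currentCityIdx 0
      (st2.1 + (fuelAtCity * mpg - distanceToGo), st2.2.1, st2.2.2))
    (0, 0, 0)
  if s.1 ≥ 0 then s.2.1 else -1

-- ===== PORT B =====
-- state = (total, tank, start); loop over enumerate(distances)
def pvAltLoop (fuel : List Int) (mpg : Int) : List (Int × Int) → Int × Int × Int → Int × Int × Int
  | [], st => st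
  | (i, distance) :: rest, (total, tank, start) =>
    let delta := PySem.List.pyGetD fuel i 0 * mpg - distance
    let total := total + delta
    let tank := tank + delta
    if tank < 0 then pvAltLoop fuel mpg rest (total, 0, i + 1)
    else pvAltLoop fuel mpg rest (total, tank, start)

def validStartingCityTwo_alt (distances : List Int) (fuel : List Int) (mpg : Int) : Int :=
  let s := pvAltLoop fuel mpg (PySem.List.enumerate distances 0) (0, 0, 0)
  if s.1 ≥ 0 then s.2.2 else -1

-- ===== PRECONDITION & SPEC =====
-- Pre_ excludes only the inputs on which Python A raises IndexError: fuel shorter than distances.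
def Pre_validStartingCityTwo (distances : List Int) (fuel : List Int) (mpg : Int) : Prop :=
  distances.length ≤ fuel.length
instance (distances : List Int) (fuel : List Int) (mpg : Int) : Decidable (Pre_validStartingCityTwo distances fuel mpg) := by unfold Pre_validStartingCityTwo; infer_instance
def pvWitness_validStartingCityTwo : List Int × List Int × Int := ([5, 25, 15, 10, 15], [1, 2, 1, 0, 3], 10)

def Spec_validStartingCityTwo (distances : List Int) (fuel : List Int) (mpg : Int) (out : Int) : Prop := out = validStartingCityTwo_alt distances fuel mpg
instance (distances : List Int) (fuel : List Int) (mpg : Int) (out : Int) : Decidable (Spec_validStartingCityTwo distances fuel mpg out) := by unfold Spec_validStartingCityTwo; infer_instance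

-- ===== CLAIM (what is proved, stated in full; the proofs are below) =====
def Claim_equal_validStartingCityTwo : Prop := ∀ (distances : List Int) (fuel : List Int) (mpg : Int), Dom_validStartingCityTwo distances fuel mpg → Pre_validStartingCityTwo distances fuel mpg → Spec_validStartingCityTwo distances fuel mpg (validStartingCityTwo distances fuel mpg)

-- ===== LEMMAS AND PROOFS =====

-- The step function of port A, named for the proofs.
def pvAStep (distances fuel : List Int) (mpg : Int) (st : Int × Int × Int) (i : Int) : Int × Int × Int :=
  let currentCityIdx := PySem.Int.mod i (distances.length : Int)
  let st2 := if st.1 < st.2.2 then (st.1, currentCityIdx, st.1) else st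
  let distanceToGo := PySem.List.pyGetD distances currentCityIdx 0
  let fuelAtCity := PySem.List.pyGetD fuel currentCityIdx 0
  (st2.1 + (fuelAtCity * mpg - distanceToGo), st2.2.1, st2.2.2)

theorem pvMod_small (i n : Int) (h0 : 0 ≤ i) (h1 : i < n) : PySem.Int.mod i n = i := by
  rw [PySem.Int.mod_eq_emod_of_pos (by omega)]
  exact Int.emod_eq_of_lt h0 h1

-- Main invariant: A's fold over the remaining indices vs B's loop over the remaining
-- enumerated suffix; mr = total, tank = mr - min mv mr, st = (if mr < mv then k else mi).
theorem pvLoop_eq (distances fuel : List Int) (mpg : Int) :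
    ∀ (ds : List Int) (k : Nat), distances.drop k = ds → k ≤ distances.length →
    ∀ (mr mi mv tank st : Int), mv ≤ 0 → tank = mr - min mv mr →
      st = (if mr < mv then (k : Int) else mi) →
      (pvAltLoop fuel mpg (PySem.List.enumerate ds (k : Int)) (mr, tank, st)).1 =
        ((PySem.List.pyRange (k : Int) (distances.length : Int) 1).foldl (pvAStep distances fuel mpg) (mr, mi, mv)).1 ∧
      ((PySem.List.pyRange (k : Int) (distances.length : Int) 1).foldl (pvAStep distances fuel mpg) (mr, mi, mv)).2.2 ≤ 0 ∧
      (pvAltLoop fuel mpg (PySem.List.enumerate ds (k : Int)) (mr, tank, st)).2.2 =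
        (if ((PySem.List.pyRange (k : Int) (distances.length : Int) 1).foldl (pvAStep distances fuel mpg) (mr, mi, mv)).1 <
            ((PySem.List.pyRange (k : Int) (distances.length : Int) 1).foldl (pvAStep distances fuel mpg) (mr, mi, mv)).2.2
         then (distances.length : Int)
         else ((PySem.List.pyRange (k : Int) (distances.length : Int) 1).foldl (pvAStep distances fuel mpg) (mr, mi, mv)).2.1) := by
  intro ds
  induction ds with
  | nil =>
    intro k hk hkle mr mi mv tank st hmv htank hst
    have hlen : distances.length ≤ k := by
      by_contra h
      have := List.drop_eq_nil_iff.mp hk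
      omega
    have hkeq : k = distances.length := le_antisymm hkle hlen
    rw [PySem.List.pyRange_one_eq_nil (by omega)]
    simp only [PySem.List.enumerate, pvAltLoop, List.foldl_nil]
    refine ⟨by trivial, hmv, ?_⟩
    rw [hst, hkeq]
  | cons d rest ih =>
    intro k hk hkle mr mi mv tank st hmv htank hst
    have hkn : k < distances.length := by
      by_contra h
      have hnil : distances.drop k = [] := List.drop_eq_nil_iff.mpr (by omega)
      rw [hnil] at hk; simp at hk
    have hsome : distances[k]? = some d := by
      have h0 : distances[k + 0]? = some d := by
        rw [← List.getElem?_drop, hk]; rfl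
      simpa using h0
    have hget : distances[k]'hkn = d := by
      rw [List.getElem?_eq_getElem hkn] at hsome
      exact Option.some.inj hsome
    have hdrop : distances.drop (k + 1) = rest := by
      rw [← List.tail_drop, hk]
      rfl
    rw [PySem.List.pyRange_one_cons (by exact_mod_cast hkn)]
    rw [PySem.List.enumerate_cons]
    simp only [List.foldl_cons]
    have hmodk : PySem.Int.mod (k : Int) (distances.length : Int) = (k : Int) :=
      pvMod_small _ _ (by positivity) (by exact_mod_cast hkn)
    have hgetk : PySem.List.pyGetD distances (k : Int) 0 = d := by
      rw [PySem.List.pyGetD_natCast]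
      simp [List.getD, hsome]
    have hAstep : pvAStep distances fuel mpg (mr, mi, mv) (k : Int) =
        (mr + (PySem.List.pyGetD fuel (k : Int) 0 * mpg - d),
         (if mr < mv then (k : Int) else mi), min mv mr) := by
      by_cases h : mr < mv
      · simp [pvAStep, hmodk, hgetk, h, min_eq_right h.le]
      · simp [pvAStep, hmodk, hgetk, h, min_eq_left (not_lt.mp h)]
    rw [hAstep]
    simp only [pvAltLoop]
    have hcast : (k : Int) + 1 = ((k + 1 : Nat) : Int) := by push_cast; ring
    by_cases hneg : tank + (PySem.List.pyGetD fuel (k : Int) 0 * mpg - d) < 0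
    · rw [if_pos hneg, hcast]
      exact ih (k + 1) hdrop (by omega) _ _ _ _ _
        (by omega) (by omega) (by rw [if_pos (by omega)])
    · rw [if_neg hneg, hcast]
      exact ih (k + 1) hdrop (by omega) _ _ _ _ _
        (by omega) (by omega) (by rw [if_neg (by omega), hst])

-- ===== VERDICT (by name: the statement is the Claim_ definition above) =====
theorem validStartingCityTwo_spec : Claim_equal_validStartingCityTwo := by
  intro distances fuel mpg _ _
  unfold Spec_validStartingCityTwo validStartingCityTwo validStartingCityTwo_alt
  have h := pvLoop_eq distances fuel mpg distances 0 (by simp) (by omega) 0 0 0 0 0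
    (le_refl 0) (by simp) (by simp)
  simp only [Nat.cast_zero] at h
  obtain ⟨h1, h2, h3⟩ := h
  set outA := (PySem.List.pyRange 0 (distances.length : Int) 1).foldl
    (pvAStep distances fuel mpg) (0, 0, 0) with houtA
  set outB := pvAltLoop fuel mpg (PySem.List.enumerate distances 0) (0, 0, 0) with houtB
  have hA : (let noOfCities : Int := distances.length
      let s := (PySem.List.pyRange 0 noOfCities 1).foldl
        (fun (st : Int × Int × Int) i =>
          let currentCityIdx := PySem.Int.mod i noOfCities
          let st2 := if st.1 < st.2.2 then (st.1, currentCityIdx, st.1) else st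
          let distanceToGo := PySem.List.pyGetD distances currentCityIdx 0
          let fuelAtCity := PySem.List.pyGetD fuel currentCityIdx 0
          (st2.1 + (fuelAtCity * mpg - distanceToGo), st2.2.1, st2.2.2))
        (0, 0, 0)
      if s.1 ≥ 0 then s.2.1 else (-1 : Int)) = (if outA.1 ≥ 0 then outA.2.1 else -1) := rfl
  have hB : (let s := pvAltLoop fuel mpg (PySem.List.enumerate distances 0) (0, 0, 0)
      if s.1 ≥ 0 then s.2.2 else (-1 : Int)) = (if outB.1 ≥ 0 then outB.2.2 else -1) := rfl
  rw [hA, hB, h3, h1]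
  by_cases hge : outA.1 ≥ 0
  · rw [if_pos hge, if_pos hge, if_neg (by omega)]
  · rw [if_neg hge, if_neg hge]
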